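-- pv_equiv track=rewrite | github.com/dipesh0078/Python | sets/set_30.py | unique_combinations
-- ===== SOURCE A (Python) =====
-- def unique_combinations(elements):
--     unique_set=set()
--     uniqe_elements=set(elements)
--     for element1 in uniqe_elements:
--         for element2 in uniqe_elements:
--             if element1!=element2:
--                 unique_set.add(tuple(sorted((element1,element2))))
--
--     return unique_set
-- ===== SOURCE B (Python) =====
-- def unique_combinations(elements):
--     rest = list(set(elements))
--     out = set()
--     while rest:
--         x = rest.pop(0)
--         for y in rest:
--             out.add((x, y) if x < y else (y, x))
--     return out
-- ===== Notes on version B (the rewrite author's own statement) =====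
-- stated objective: faster
-- what changed: Instead of a full cartesian double loop over the deduplicated elements with a != guard, a per-pair sorted() call and set-level deduplication of pairs, B consumes the deduplicated list as a queue, pairing each popped element once with every remaining element, so each unordered pair is generated exactly once already ordered by a single comparison.
import Mathlib
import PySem

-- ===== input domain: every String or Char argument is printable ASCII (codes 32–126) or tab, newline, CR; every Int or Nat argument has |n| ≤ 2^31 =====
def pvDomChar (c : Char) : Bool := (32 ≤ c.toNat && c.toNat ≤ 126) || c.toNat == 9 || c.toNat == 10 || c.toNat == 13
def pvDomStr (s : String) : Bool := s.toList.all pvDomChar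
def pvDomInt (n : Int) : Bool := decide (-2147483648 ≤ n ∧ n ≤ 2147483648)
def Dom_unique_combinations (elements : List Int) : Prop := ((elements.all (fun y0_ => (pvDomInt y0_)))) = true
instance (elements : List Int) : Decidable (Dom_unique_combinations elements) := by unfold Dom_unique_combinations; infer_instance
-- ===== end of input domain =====

-- B generates each unordered pair exactly once (queue of remaining elements) instead of
-- A's full cartesian loop with a != guard, a per-pair sorted() call and pair-set dedup.
-- Both Pythons return a set, so only the set of pairs is observable; the ports agree as lists.

-- ===== PORT A =====
-- tuple(sorted((a, b)))
def pairSortedA (a b : Int) : Int × Int :=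
  match PySem.List.sorted [a, b] (fun x => x) false with
  | [u, v] => (u, v)
  | _ => (a, b)  -- unreachable: sorted of a two-element list has two elements

def unique_combinations (elements : List Int) : List (Int × Int) :=
  let uniqe_elements : PySem.Set Int := PySem.Set.ofList elements
  uniqe_elements.foldl
    (fun s element1 =>
      uniqe_elements.foldl
        (fun s element2 =>
          if element1 ≠ element2 then PySem.Set.add s (pairSortedA element1 element2) else s)
        s)
    PySem.Set.empty

-- ===== PORT B =====
-- (x, y) if x < y else (y, x)
def pairMinB (x y : Int) : Int × Int := if x < y then (x, y) else (y, x)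

-- the while loop: x = rest.pop(0); inner for over the remaining rest
def ucGo (rest : List Int) (out : PySem.Set (Int × Int)) : List (Int × Int) :=
  match rest with
  | [] => out
  | x :: rest' => ucGo rest' (rest'.foldl (fun s y => PySem.Set.add s (pairMinB x y)) out)

def unique_combinations_alt (elements : List Int) : List (Int × Int) :=
  ucGo (PySem.Set.ofList elements) PySem.Set.empty

-- ===== PRECONDITION & SPEC =====
def Spec_unique_combinations (elements : List Int) (out : List (Int × Int)) : Prop := out = unique_combinations_alt elements
instance (elements : List Int) (out : List (Int × Int)) : Decidable (Spec_unique_combinations elements out) := by unfold Spec_unique_combinations; infer_instance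

-- ===== CLAIM (what is proved, stated in full; the proofs are below) =====
def Claim_equal_unique_combinations : Prop := ∀ (elements : List Int), Dom_unique_combinations elements → Spec_unique_combinations elements (unique_combinations elements)

-- ===== LEMMAS AND PROOFS =====

-- the common pure value both loops produce: rows of min/max pairs of a nodup list
def pairsT : List Int → List (Int × Int)
  | [] => []
  | x :: r => r.map (pairMinB x) ++ pairsT r

theorem pairMinB_eq_minmax (x y : Int) : pairMinB x y = (min x y, max x y) := by
  unfold pairMinB
  split
  · next h => rw [min_eq_left h.le, max_eq_right h.le]
  · next h => rw [min_eq_right (not_lt.mp h), max_eq_left (not_lt.mp h)]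

theorem pairMinB_comm (x y : Int) : pairMinB x y = pairMinB y x := by
  simp [pairMinB_eq_minmax, min_comm, max_comm]

theorem pairMinB_inj {a b c d : Int} (h : pairMinB a b = pairMinB c d) :
    (a = c ∧ b = d) ∨ (a = d ∧ b = c) := by
  simp only [pairMinB_eq_minmax, Prod.mk.injEq, min_def, max_def] at h
  split_ifs at h <;> omega

theorem pairSortedA_ne {a b : Int} (h : a ≠ b) : pairSortedA a b = pairMinB a b := by
  unfold pairSortedA pairMinB
  rcases lt_trichotomy a b with hlt | heq | hgt
  · rw [PySem.List.sorted_eq_of_perm_of_pairwise_lt _ _ _ (List.Perm.refl _)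
      (by simpa using hlt)]
    simp [hlt]
  · exact absurd heq h
  · rw [PySem.List.sorted_eq_of_perm_of_pairwise_lt _ _ _ (List.Perm.swap _ _ _)
      (by simpa using hgt)]
    simp [not_lt.mpr (le_of_lt hgt)]

-- A's inner step equals the same step written with pairMinB (the guard makes them agree)
theorem stepA_eq (element1 : Int) :
    (fun (s : List (Int × Int)) element2 =>
        if element1 ≠ element2 then PySem.Set.add s (pairSortedA element1 element2) else s)
    = (fun s element2 =>
        if element1 ≠ element2 then PySem.Set.add s (pairMinB element1 element2) else s) := by
  funext s e2
  by_cases h : element1 = e2 <;> simp [h, pairSortedA_ne]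

-- a fold of fresh adds appends the mapped list
theorem foldl_add_fresh {β : Type} (f : β → Int × Int) :
    ∀ (l : List β) (s : List (Int × Int)),
      (∀ y ∈ l, f y ∉ s) → (l.map f).Nodup →
      l.foldl (fun s y => PySem.Set.add s (f y)) s = s ++ l.map f := by
  intro l
  induction l with
  | nil => intro s _ _; simp
  | cons y t ih =>
    intro s hfresh hnd
    rw [List.map_cons, List.nodup_cons] at hnd
    simp only [List.foldl_cons, List.map_cons]
    rw [PySem.Set.add_of_not_mem (hfresh y (by simp))]
    rw [ih (s ++ [f y]) ?_ hnd.2]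
    · simp
    · intro z hz hmem
      rcases List.mem_append.mp hmem with h | h
      · exact hfresh z (by simp [hz]) h
      · exact hnd.1 (List.mem_singleton.mp h ▸ List.mem_map_of_mem hz)

-- a guarded fold over already-present (or skipped) elements is a no-op
theorem foldl_guard_noop (x : Int) :
    ∀ (l : List Int) (s : List (Int × Int)),
      (∀ y ∈ l, x = y ∨ pairMinB x y ∈ s) →
      l.foldl (fun s y => if x ≠ y then PySem.Set.add s (pairMinB x y) else s) s = s := by
  intro l
  induction l with
  | nil => intro s _; rfl
  | cons y t ih =>
    intro s h
    simp only [List.foldl_cons]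
    rcases h y (by simp) with heq | hmem
    · subst heq
      rw [if_neg (by simp)]
      exact ih s (fun z hz => h z (by simp [hz]))
    · by_cases hxy : x = y
      · subst hxy
        rw [if_neg (by simp)]
        exact ih s (fun z hz => h z (by simp [hz]))
      · rw [if_pos hxy, PySem.Set.add_of_mem hmem]
        exact ih s (fun z hz => h z (by simp [hz]))

-- A's inner loop over u = p ++ x :: r: the p-part and x are no-ops, the r-part appends row x
theorem innerA_eq (x : Int) (p r : List Int) (s : List (Int × Int))
    (hnd : (p ++ x :: r).Nodup)
    (hp : ∀ y ∈ p, pairMinB x y ∈ s)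
    (hr : ∀ y ∈ r, pairMinB x y ∉ s) :
    (p ++ x :: r).foldl
      (fun s y => if x ≠ y then PySem.Set.add s (pairMinB x y) else s) s
    = s ++ r.map (pairMinB x) := by
  rw [List.foldl_append]
  rw [foldl_guard_noop x p s (fun y hy => Or.inr (hp y hy))]
  simp only [List.foldl_cons, ne_eq, not_true_eq_false, if_false]
  have hxr : x ∉ r := by
    have := hnd.of_append_right
    exact (List.nodup_cons.mp this).1
  have hrnd : r.Nodup := (List.nodup_cons.mp hnd.of_append_right).2
  have hguard : (fun (s : List (Int × Int)) y =>
      if x ≠ y then PySem.Set.add s (pairMinB x y) else s)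
      = fun s y => if x = y then s else PySem.Set.add s (pairMinB x y) := by
    funext s y; by_cases h : x = y <;> simp [h]
  have hmapnd : (r.map (pairMinB x)).Nodup := by
    refine List.Nodup.map_on ?_ hrnd
    intro a ha b hb hab
    rcases pairMinB_inj hab with ⟨h1, h2⟩ | ⟨h1, h2⟩
    · exact h2
    · exact absurd (h1 ▸ hb) hxr
  calc r.foldl (fun s y => if x ≠ y then PySem.Set.add s (pairMinB x y) else s) s
      = r.foldl (fun s y => PySem.Set.add s (pairMinB x y)) s := by
        apply PySem.List.foldl_congr_mem
        intro s' y hy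
        have hne : x ≠ y := fun h => hxr (h ▸ hy)
        rw [if_pos hne]
    _ = s ++ r.map (pairMinB x) := foldl_add_fresh (pairMinB x) r s hr hmapnd

-- A's outer loop, generalized over the processed prefix p with a membership invariant on s
theorem outerA_eq (u : List Int) (hund : u.Nodup) :
    ∀ (r p : List Int) (s : List (Int × Int)),
      u = p ++ r →
      (∀ z, z ∈ s ↔ ∃ a b, a ∈ p ∧ b ∈ u ∧ a ≠ b ∧ z = pairMinB a b) →
      r.foldl (fun s e1 =>
        u.foldl (fun s e2 => if e1 ≠ e2 then PySem.Set.add s (pairMinB e1 e2) else s) s) s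
      = s ++ pairsT r := by
  intro r
  induction r with
  | nil => intro p s _ _; simp [pairsT]
  | cons x r' ih =>
    intro p s hu hinv
    simp only [List.foldl_cons]
    have hnd : (p ++ x :: r').Nodup := hu ▸ hund
    have hxp : x ∉ p := fun hxp =>
      (List.disjoint_of_nodup_append hnd) hxp (by simp)
    have hinner : u.foldl
        (fun s e2 => if x ≠ e2 then PySem.Set.add s (pairMinB x e2) else s) s
        = s ++ r'.map (pairMinB x) := by
      rw [hu]
      apply innerA_eq x p r' s hnd
      · intro y hy
        exact (hinv _).mpr ⟨y, x, hy, by simp [hu], fun h => hxp (h ▸ hy), (pairMinB_comm x y)⟩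
      · intro y hy hmem
        rcases (hinv _).mp hmem with ⟨a, b, hap, _, hab, heq⟩
        rcases pairMinB_inj heq.symm with ⟨h1, _⟩ | ⟨h1, _⟩
        · exact hxp (h1 ▸ hap)
        · exact (List.disjoint_of_nodup_append hnd) (h1 ▸ hap) (by simp [hy])
    rw [hinner]
    rw [ih (p ++ [x]) (s ++ r'.map (pairMinB x)) (by simp [hu]) ?_]
    · simp [pairsT]
    · intro z
      constructor
      · intro hz
        rcases List.mem_append.mp hz with hz | hz
        · rcases (hinv z).mp hz with ⟨a, b, hap, hbu, hab, heq⟩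
          exact ⟨a, b, by simp [hap], hbu, hab, heq⟩
        · rcases List.mem_map.mp hz with ⟨y, hy, heq⟩
          refine ⟨x, y, by simp, by simp [hu, hy], ?_, heq.symm⟩
          intro h
          exact (List.nodup_cons.mp hnd.of_append_right).1 (h ▸ hy)
      · rintro ⟨a, b, hap, hbu, hab, heq⟩
        rcases List.mem_append.mp hap with hap | hax
        · exact List.mem_append.mpr (Or.inl ((hinv z).mpr ⟨a, b, hap, hbu, hab, heq⟩))
        · have hax : a = x := by simpa using hax
          subst hax
          rw [hu] at hbu
          rcases List.mem_append.mp hbu with hbp | hbx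
          · refine List.mem_append.mpr (Or.inl ((hinv z).mpr
              ⟨b, a, hbp, by simp [hu], fun h => hab h.symm, ?_⟩))
            rw [heq, pairMinB_comm]
          · rcases List.mem_cons.mp hbx with hbx | hbr
            · exact absurd hbx.symm hab
            · exact List.mem_append.mpr (Or.inr (List.mem_map.mpr ⟨b, hbr, heq.symm⟩))

-- B's loop appends the rows, given freshness of all remaining pairs
theorem ucGo_eq (r : List Int) (hnd : r.Nodup) :
    ∀ (out : List (Int × Int)),
      (∀ a b, a ∈ r → b ∈ r → a ≠ b → pairMinB a b ∉ out) →
      ucGo r out = out ++ pairsT r := by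
  induction r with
  | nil => intro out _; simp [ucGo, pairsT]
  | cons x r' ih =>
    intro out hfresh
    have hxr : x ∉ r' := (List.nodup_cons.mp hnd).1
    have hrnd : r'.Nodup := (List.nodup_cons.mp hnd).2
    have hmapnd : (r'.map (pairMinB x)).Nodup := by
      refine List.Nodup.map_on ?_ hrnd
      intro a ha b hb hab
      rcases pairMinB_inj hab with ⟨_, h2⟩ | ⟨h1, _⟩
      · exact h2
      · exact absurd (h1 ▸ hb) hxr
    simp only [ucGo]
    rw [foldl_add_fresh (pairMinB x) r' out
      (fun y hy => hfresh x y (by simp) (by simp [hy]) (fun h => hxr (h ▸ hy))) hmapnd]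
    rw [ih hrnd (out ++ r'.map (pairMinB x)) ?_]
    · simp [pairsT]
    · intro a b ha hb hab hmem
      rcases List.mem_append.mp hmem with hmem | hmem
      · exact hfresh a b (by simp [ha]) (by simp [hb]) hab hmem
      · rcases List.mem_map.mp hmem with ⟨y, _, heq⟩
        rcases pairMinB_inj heq.symm with ⟨h1, _⟩ | ⟨_, h2⟩
        · exact hxr (h1 ▸ ha)
        · exact hxr (h2 ▸ hb)

-- ===== VERDICT (by name: the statement is the Claim_ definition above) =====
theorem unique_combinations_spec : Claim_equal_unique_combinations := by
  intro elements _
  unfold Spec_unique_combinations unique_combinations unique_combinations_alt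
  have hnd : (PySem.Set.ofList elements).Nodup := PySem.Set.nodup_ofList elements
  show (PySem.Set.ofList elements).foldl
      (fun s element1 =>
        (PySem.Set.ofList elements).foldl
          (fun s element2 =>
            if element1 ≠ element2 then PySem.Set.add s (pairSortedA element1 element2) else s) s)
      PySem.Set.empty
    = ucGo (PySem.Set.ofList elements) PySem.Set.empty
  rw [show (fun (s : List (Int × Int)) element1 =>
        (PySem.Set.ofList elements).foldl
          (fun s element2 =>
            if element1 ≠ element2 then PySem.Set.add s (pairSortedA element1 element2) else s) s)
      = (fun s element1 =>
        (PySem.Set.ofList elements).foldl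
          (fun s element2 =>
            if element1 ≠ element2 then PySem.Set.add s (pairMinB element1 element2) else s) s)
      from funext fun s => funext fun e1 => by rw [stepA_eq e1]]
  rw [outerA_eq (PySem.Set.ofList elements) hnd (PySem.Set.ofList elements) [] PySem.Set.empty
      rfl (by simp [PySem.Set.empty])]
  rw [ucGo_eq (PySem.Set.ofList elements) hnd PySem.Set.empty (by simp [PySem.Set.empty])]
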